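-- pv_equiv track=rewrite | github.com/BiqiangWang/leetcode | daily/2347.py | checkTKorPair
-- ===== SOURCE A (Python) =====
-- def checkTKorPair(rank):
--     d = dict()
--     for i in rank:
--         if i not in d:
--             d.setdefault(i, 1)
--         else:
--             d[i] += 1
--             if d[i] == 3:
--                 return 3
--     for item in d.items():
--         if item[1] == 2:
--             return 2
--     return 1
-- ===== SOURCE B (Python) =====
-- def checkTKorPair(rank):
--     best = 0
--     run = 0
--     prev = None
--     for v in sorted(rank):
--         if prev is not None and v == prev:
--             run += 1
--         else:
--             run = 1
--             prev = v
--         if run > best: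
--             best = run
--     if best >= 3:
--         return 3
--     if best == 2:
--         return 2
--     return 1
-- ===== Notes on version B (the rewrite author's own statement) =====
-- stated objective: alternative
-- what changed: Replaced the dict frequency-counting with early return by a sort-then-scan: walk sorted(rank) once tracking the maximum run length of equal adjacent values, then map max run >=3 / ==2 / else to 3/2/1.
import Mathlib
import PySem

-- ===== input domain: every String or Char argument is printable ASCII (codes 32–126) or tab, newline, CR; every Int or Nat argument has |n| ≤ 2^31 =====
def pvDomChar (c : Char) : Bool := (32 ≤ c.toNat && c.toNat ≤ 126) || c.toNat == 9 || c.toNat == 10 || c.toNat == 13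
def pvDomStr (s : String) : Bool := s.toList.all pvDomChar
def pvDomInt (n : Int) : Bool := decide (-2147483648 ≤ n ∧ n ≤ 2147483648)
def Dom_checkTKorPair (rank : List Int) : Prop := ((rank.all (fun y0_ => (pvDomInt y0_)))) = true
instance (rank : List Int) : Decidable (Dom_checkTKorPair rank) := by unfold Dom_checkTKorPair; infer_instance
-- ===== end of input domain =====

-- B replaces A's dict frequency-counting (with early return) by a sort-then-scan of run lengths; alternative decomposition, not claimed faster.

-- ===== PORT A =====
-- first loop of A: builds the count dict, .error 3 models the early 'return 3'
def pvALoop (l : List Int) (d : PySem.Dict Int Int) : Except Int (PySem.Dict Int Int) :=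
  match l with
  | [] => .ok d
  | i :: rest =>
    if d.contains i = false then
      pvALoop rest (d.setdefault i 1)
    else
      let d' := d.modify i 0 (· + 1)        -- d[i] += 1
      if d'.getD i 0 = 3 then .error 3 else pvALoop rest d'

-- second loop of A: scan the items for a value equal to 2
def pvAScan (l : List (Int × Int)) : Int :=
  match l with
  | [] => 1
  | kv :: rest => if kv.2 = 2 then 2 else pvAScan rest

def checkTKorPair (rank : List Int) : Int :=
  match pvALoop rank PySem.Dict.empty with
  | .error r => r
  | .ok d => pvAScan d.items

-- ===== PORT B =====
-- single pass over the sorted list: prev element, current run length, best run length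
def pvBRun (l : List Int) (prev : Option Int) (run best : Int) : Int :=
  match l with
  | [] => best
  | v :: rest =>
    let run' := if prev = some v then run + 1 else 1
    pvBRun rest (some v) run' (if run' > best then run' else best)

def checkTKorPair_alt (rank : List Int) : Int :=
  let best := pvBRun (PySem.List.sorted rank (fun x => x) false) none 0 0
  if best ≥ 3 then 3 else if best = 2 then 2 else 1

-- ===== PRECONDITION & SPEC =====
def Spec_checkTKorPair (rank : List Int) (out : Int) : Prop := out = checkTKorPair_alt rank
instance (rank : List Int) (out : Int) : Decidable (Spec_checkTKorPair rank out) := by unfold Spec_checkTKorPair; infer_instance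

-- ===== CLAIM (what is proved, stated in full; the proofs are below) =====
def Claim_equal_checkTKorPair : Prop := ∀ (rank : List Int), Dom_checkTKorPair rank → Spec_checkTKorPair rank (checkTKorPair rank)

-- ===== LEMMAS AND PROOFS =====

-- common reference value: 3 if some rank occurs ≥ 3 times, else 2 if some rank occurs exactly twice, else 1
def pvMid (r : List Int) : Int :=
  if ∃ x ∈ r, 3 ≤ r.count x then 3 else if ∃ x ∈ r, r.count x = 2 then 2 else 1

-- ---------- A side: the dict is the counter of the processed prefix, all stored counts ≤ 2 ----------

def pvInvA (p : List Int) (d : PySem.Dict Int Int) : Prop :=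
  d.keys.Nodup ∧ (∀ x, d.getD x 0 = (p.count x : Int)) ∧
  (∀ x, d.contains x = true ↔ x ∈ p) ∧ (∀ x, p.count x ≤ 2)

def pvAResult (l : List Int) (d : PySem.Dict Int Int) : Int :=
  match pvALoop l d with
  | .error r => r
  | .ok d' => pvAScan d'.items

lemma pvAScan_eq (l : List (Int × Int)) :
    pvAScan l = if ∃ kv ∈ l, kv.2 = 2 then 2 else 1 := by
  induction l with
  | nil => simp [pvAScan]
  | cons kv rest ih =>
    simp only [pvAScan, ih]
    by_cases h : kv.2 = 2
    · rw [if_pos h, if_pos ⟨kv, by simp, h⟩]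
    · rw [if_neg h]
      by_cases h2 : ∃ p ∈ rest, p.2 = 2
      · rw [if_pos h2, if_pos (by obtain ⟨p, hp, hp2⟩ := h2; exact ⟨p, by simp [hp], hp2⟩)]
      · rw [if_neg h2, if_neg ?_]
        rintro ⟨p, hp, hp2⟩
        rcases List.mem_cons.1 hp with rfl | hpr
        · exact h hp2
        · exact h2 ⟨p, hpr, hp2⟩

lemma pvALoop_spec : ∀ (l p : List Int) (d : PySem.Dict Int Int),
    pvInvA p d → pvAResult l d = pvMid (p ++ l) := by
  intro l
  induction l with
  | nil =>
    intro p d hinv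
    obtain ⟨hnd, hgetD, hcont, hle⟩ := hinv
    simp only [pvAResult, pvALoop, List.append_nil]
    rw [pvAScan_eq]
    unfold pvMid
    have hno3 : ¬ ∃ x ∈ p, 3 ≤ p.count x := by
      rintro ⟨x, _, hcx⟩; have := hle x; omega
    rw [if_neg hno3]
    have hiff : (∃ kv ∈ d.items, kv.2 = 2) ↔ (∃ x ∈ p, p.count x = 2) := by
      constructor
      · rintro ⟨⟨k, v⟩, hkv, hv2⟩
        have hget : d.get? k = some v := PySem.Dict.get?_of_mem_items d hkv hnd
        have hgd : d.getD k 0 = v := PySem.Dict.getD_of_get?_eq_some d 0 hget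
        have hck : (p.count k : Int) = v := by rw [← hgetD k, hgd]
        simp only at hv2
        have hck2 : p.count k = 2 := by omega
        exact ⟨k, List.count_pos_iff.1 (by omega), hck2⟩
      · rintro ⟨x, hx, hcx⟩
        have hk : x ∈ d.keys := (PySem.Dict.contains_iff_mem_keys d x).1 ((hcont x).2 hx)
        have hmemi : (x, d.getD x 0) ∈ d.items := by
          rw [PySem.Dict.items_eq_map_keys d hnd 0]
          exact List.mem_map.2 ⟨x, hk, rfl⟩
        exact ⟨(x, d.getD x 0), hmemi, by simp only; rw [hgetD x, hcx]; rfl⟩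
    by_cases h2 : ∃ x ∈ p, p.count x = 2
    · rw [if_pos (hiff.2 h2), if_pos h2]
    · rw [if_neg (fun h => h2 (hiff.1 h)), if_neg h2]
  | cons i rest ih =>
    intro p d hinv
    obtain ⟨hnd, hgetD, hcont, hle⟩ := hinv
    by_cases hc : d.contains i = false
    · -- i not yet seen: count i p = 0
      have hip : i ∉ p := fun hm => by
        have := (hcont i).2 hm; rw [hc] at this; exact Bool.false_ne_true this
      have hcnt0 : p.count i = 0 := List.count_eq_zero.2 hip
      have hsd : d.setdefault i 1 = d.insert i 1 :=
        PySem.Dict.setdefault_of_not_contains d 1 hc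
      have hloop : pvALoop (i :: rest) d = pvALoop rest (d.insert i 1) := by
        conv_lhs => rw [pvALoop.eq_def]
        simp [hc, hsd]
      have hstep : pvAResult (i :: rest) d = pvAResult rest (d.insert i 1) := by
        simp only [pvAResult, hloop]
      rw [hstep]
      rw [ih (p ++ [i]) (d.insert i 1) ?_]
      · rw [List.append_assoc]; rfl
      · refine ⟨PySem.Dict.nodup_keys_insert _ _ _ hnd, ?_, ?_, ?_⟩
        · intro x
          rw [PySem.Dict.getD_insert]
          by_cases hx : x = i
          · subst hx
            simp [List.count_append, hcnt0]
          · rw [if_neg hx, hgetD x]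
            have hxi : ¬ i = x := fun h => hx h.symm
            simp [List.count_append, hxi]
        · intro x
          rw [PySem.Dict.contains_insert]
          simp only [List.mem_append, List.mem_singleton]
          constructor
          · intro h
            rcases Bool.or_eq_true_iff.1 h with h | h
            · right; exact beq_iff_eq.1 h
            · left; exact (hcont x).1 h
          · intro h
            rcases h with h | h
            · exact Bool.or_eq_true_iff.2 (Or.inr ((hcont x).2 h))
            · exact Bool.or_eq_true_iff.2 (Or.inl (beq_iff_eq.2 h))
        · intro x
          by_cases hx : x = i
          · subst hx; simp [List.count_append, hcnt0]
          · have hxi : ¬ i = x := fun h => hx h.symm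
            have := hle x
            simp [List.count_append, hxi]; omega
    · -- i already seen
      have hip : i ∈ p := (hcont i).1 (by revert hc; cases d.contains i <;> simp)
      have hcnt1 : 1 ≤ p.count i := List.one_le_count_iff.2 hip
      have hgd' : (d.modify i 0 (· + 1)).getD i 0 = (p.count i : Int) + 1 := by
        rw [PySem.Dict.getD_modify_self, hgetD i]
      by_cases h3 : p.count i = 2
      · -- early return 3
        have h33 : (d.modify i 0 (· + 1)).getD i 0 = 3 := by
          rw [hgd', h3]; norm_num
        have hres : pvAResult (i :: rest) d = 3 := by
          unfold pvAResult
          conv_lhs => rw [pvALoop.eq_def]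
          simp [hc, h33]
        rw [hres]
        unfold pvMid
        have hex : ∃ x ∈ p ++ i :: rest, 3 ≤ (p ++ i :: rest).count x := by
          refine ⟨i, by simp, ?_⟩
          rw [List.count_append, List.count_cons_self, h3]
          omega
        rw [if_pos hex]
      · have hcount2 : p.count i = 1 := by have := hle i; omega
        have hne3 : ¬ (d.modify i 0 (· + 1)).getD i 0 = 3 := by
          rw [hgd', hcount2]; norm_num
        have hloop : pvALoop (i :: rest) d = pvALoop rest (d.modify i 0 (· + 1)) := by
          conv_lhs => rw [pvALoop.eq_def]
          simp [hc]
          intro hcontra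
          rw [hgetD i] at hcontra
          rw [hcount2] at hcontra
          norm_num at hcontra
        have hstep : pvAResult (i :: rest) d = pvAResult rest (d.modify i 0 (· + 1)) := by
          simp only [pvAResult, hloop]
        rw [hstep]
        rw [ih (p ++ [i]) (d.modify i 0 (· + 1)) ?_]
        · rw [List.append_assoc]; rfl
        · refine ⟨?_, ?_, ?_, ?_⟩
          · rw [PySem.Dict.keys_modify]
            exact PySem.Dict.nodup_keys_insert _ _ _ hnd
          · intro x
            rw [PySem.Dict.getD_modify]
            by_cases hx : x = i
            · subst hx; rw [if_pos rfl, hgetD x]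
              simp [List.count_append]
            · rw [if_neg hx, hgetD x]
              have hxi : ¬ i = x := fun h => hx h.symm
              simp [List.count_append, hxi]
          · intro x
            rw [PySem.Dict.contains_modify]
            simp only [List.mem_append, List.mem_singleton]
            constructor
            · intro h
              rcases Bool.or_eq_true_iff.1 h with h | h
              · right; exact beq_iff_eq.1 h
              · left; exact (hcont x).1 h
            · intro h
              rcases h with h | h
              · exact Bool.or_eq_true_iff.2 (Or.inr ((hcont x).2 h))
              · exact Bool.or_eq_true_iff.2 (Or.inl (beq_iff_eq.2 h))
          · intro x
            by_cases hx : x = i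
            · subst hx; simp [List.count_append, hcount2]
            · have hxi : ¬ i = x := fun h => hx h.symm
              have := hle x
              simp [List.count_append, hxi]; omega

lemma pvA_eq_mid (rank : List Int) : checkTKorPair rank = pvMid rank := by
  have h := pvALoop_spec rank [] PySem.Dict.empty ?_
  · simpa [pvAResult, checkTKorPair] using h
  · refine ⟨PySem.Dict.nodup_keys_empty, ?_, ?_, ?_⟩
    · intro x; simp [PySem.Dict.getD_empty]
    · intro x; simp [PySem.Dict.contains_empty]
    · intro x; simp

-- ---------- B side: best run of the sorted list = maximal multiplicity ----------

def pvBestFrom (l : List Int) (p r : Int) : Int :=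
  match l with
  | [] => r
  | v :: t => if p = v then pvBestFrom t p (r + 1) else max r (pvBestFrom t v 1)

def pvMC (l : List Int) : Int :=
  match l with
  | [] => 0
  | v :: t => pvBestFrom t v 1

lemma pvBestFrom_ge (l : List Int) (p r : Int) : r ≤ pvBestFrom l p r := by
  induction l generalizing p r with
  | nil => simp [pvBestFrom]
  | cons v t ih =>
    simp only [pvBestFrom]
    split
    · have := ih p (r + 1); omega
    · have := ih v 1; exact le_max_left _ _

lemma pvBRun_eq_bestFrom : ∀ (l : List Int) (p r b : Int), r ≤ b →
    pvBRun l (some p) r b = max b (pvBestFrom l p r) := by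
  intro l
  induction l with
  | nil => intro p r b h; simp [pvBRun, pvBestFrom]; omega
  | cons v t ih =>
    intro p r b h
    simp only [pvBRun, pvBestFrom]
    by_cases hv : p = v
    · subst hv
      simp only [if_true]
      rw [show (if r + 1 > b then r + 1 else b) = max b (r+1) by omega]
      rw [ih p (r+1) _ (le_max_right _ _)]
      have := pvBestFrom_ge t p (r + 1)
      omega
    · rw [if_neg (by simpa using hv), if_neg hv]
      rw [ih v 1 _ (by omega)]
      have := pvBestFrom_ge t v 1
      omega

lemma pvBRun_none (l : List Int) : pvBRun l none 0 0 = pvMC l := by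
  cases l with
  | nil => rfl
  | cons v t =>
    simp only [pvBRun, pvMC, reduceCtorEq]
    norm_num
    rw [pvBRun_eq_bestFrom t v 1 1 le_rfl]
    have := pvBestFrom_ge t v 1
    omega


lemma pvBestFrom_sorted : ∀ (t : List Int) (x r : Int), 0 ≤ r →
    List.Pairwise (· ≤ ·) (x :: t) →
    pvBestFrom t x r = max (r + (t.count x : Int)) (pvMC (t.filter (· ≠ x))) := by
  intro t
  induction t with
  | nil => intro x r hr _; simp [pvBestFrom, pvMC]; omega
  | cons v t' ih =>
    intro x r hr hp
    by_cases hv : x = v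
    · subst hv
      have hp' : List.Pairwise (· ≤ ·) (x :: t') := by
        rcases List.pairwise_cons.1 hp with ⟨_, h2⟩; exact h2
      simp only [pvBestFrom, if_true]
      rw [ih x (r+1) (by omega) hp']
      simp only [List.count_cons_self, List.filter_cons]
      norm_num
      omega
    · -- x < v strictly, so no x occurs in v :: t'
      rcases List.pairwise_cons.1 hp with ⟨hle, hp'⟩
      have hxv : x ≤ v := hle v (by simp)
      have hvx : x < v := lt_of_le_of_ne hxv hv
      have hnox : ∀ y ∈ v :: t', y ≠ x := by
        intro y hy
        have hvy : v ≤ y := by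
          rcases List.mem_cons.1 hy with h | h
          · exact le_of_eq h.symm
          · exact (List.pairwise_cons.1 hp').1 y h
        intro hyx; rw [hyx] at hvy; omega
      have hcount : (v :: t').count x = 0 := by
        rw [List.count_eq_zero]
        intro hmem; exact hnox x hmem rfl
      have hfilt : (v :: t').filter (· ≠ x) = v :: t' := by
        rw [List.filter_eq_self]
        intro a ha; simpa using hnox a ha
      simp only [pvBestFrom, if_neg hv]
      rw [hcount, hfilt]
      simp only [pvMC]
      omega


lemma pvMC_spec : ∀ (n : Nat) (s : List Int), s.length ≤ n → List.Pairwise (· ≤ ·) s →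
    (∀ y ∈ s, (s.count y : Int) ≤ pvMC s) ∧ (s ≠ [] → ∃ y ∈ s, (s.count y : Int) = pvMC s) := by
  intro n
  induction n with
  | zero =>
    intro s hlen _
    have : s = [] := List.eq_nil_of_length_eq_zero (Nat.le_zero.1 hlen)
    subst this
    exact ⟨by simp, by simp⟩
  | succ n ih =>
    intro s hlen hp
    cases s with
    | nil => exact ⟨by simp, by simp⟩
    | cons x t =>
      have hmc : pvMC (x :: t) = max (1 + (t.count x : Int)) (pvMC (t.filter (· ≠ x))) := by
        simp only [pvMC]
        exact pvBestFrom_sorted t x 1 (by omega) hp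
      set rest := t.filter (· ≠ x) with hrest
      have hps : List.Pairwise (· ≤ ·) rest :=
        List.Pairwise.sublist List.filter_sublist (List.pairwise_cons.1 hp).2
      have hlr : rest.length ≤ n := by
        have h1 : rest.length ≤ t.length := by
          rw [hrest]; exact List.length_filter_le _ t
        simp only [List.length_cons] at hlen
        omega
      obtain ⟨ihb, iha⟩ := ih rest hlr hps
      have hcx : ((x :: t).count x : Int) = 1 + (t.count x : Int) := by
        simp [List.count_cons_self]; omega
      have hcount_rest : ∀ y, y ≠ x → (x :: t).count y = rest.count y := by
        intro y hy
        rw [List.count_cons_of_ne (Ne.symm hy), hrest]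
        rw [List.count_filter (by simp [hy])]
      constructor
      · intro y hy
        by_cases hyx : y = x
        · subst hyx; rw [hcx, hmc]; exact le_max_left _ _
        · have hyt : y ∈ t := List.mem_of_ne_of_mem hyx hy
          have hyr : y ∈ rest := by rw [hrest, List.mem_filter]; simp [hyt, hyx]
          rw [hcount_rest y hyx, hmc]
          exact le_trans (ihb y hyr) (le_max_right _ _)
      · intro _
        by_cases hcase : pvMC (x :: t) = 1 + (t.count x : Int)
        · exact ⟨x, by simp, by rw [hcx, hcase]⟩
        · have hmr : pvMC (x :: t) = pvMC rest := by rw [hmc] at hcase ⊢; omega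
          have hrne : rest ≠ [] := by
            intro hnil
            have h0 : pvMC rest = 0 := by rw [hnil]; rfl
            rw [h0] at hmr
            rw [h0] at hmc
            omega
          obtain ⟨y, hyr, hycount⟩ := iha hrne
          have hyx : y ≠ x := by
            rw [hrest, List.mem_filter] at hyr; simpa using hyr.2
          have hyt : y ∈ t := by rw [hrest, List.mem_filter] at hyr; exact hyr.1
          exact ⟨y, by simp [hyt], by rw [hcount_rest y hyx, hycount, hmr]⟩

lemma pvB_eq_mid (rank : List Int) : checkTKorPair_alt rank = pvMid rank := by
  unfold checkTKorPair_alt pvMid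
  have hperm : (PySem.List.sorted rank (fun x => x) false).Perm rank :=
    PySem.List.sorted_perm rank (fun x => x) false
  set s := PySem.List.sorted rank (fun x => x) false with hs
  have hcnt : ∀ x : Int, s.count x = rank.count x := fun x => hperm.count_eq x
  have hmem : ∀ x : Int, x ∈ s ↔ x ∈ rank := fun x => hperm.mem_iff
  have hpw : List.Pairwise (· ≤ ·) s := by
    have := PySem.List.sorted_pairwise rank (fun x => x) (κ := Int)
    simpa using this
  obtain ⟨bnd, att⟩ := pvMC_spec s.length s le_rfl hpw
  rw [pvBRun_none]
  by_cases h3 : ∃ x ∈ rank, 3 ≤ rank.count x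
  · rw [if_pos h3]
    obtain ⟨x, hx, hc⟩ := h3
    have hxs : x ∈ s := (hmem x).2 hx
    have hb := bnd x hxs
    rw [hcnt x] at hb
    rw [if_pos (by omega : (3:Int) ≤ pvMC s)]
  · rw [if_neg h3]
    have hub : ∀ y ∈ s, (s.count y : Int) ≤ 2 := by
      intro y hy
      by_contra hcon
      exact h3 ⟨y, (hmem y).1 hy, by rw [← hcnt y]; omega⟩
    have hle2 : pvMC s ≤ 2 := by
      by_cases hse : s = []
      · rw [hse]; simp [pvMC]
      · obtain ⟨y, hy, hyc⟩ := att hse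
        rw [← hyc]; exact hub y hy
    rw [if_neg (by omega : ¬ (3:Int) ≤ pvMC s)]
    by_cases h2 : ∃ x ∈ rank, rank.count x = 2
    · rw [if_pos h2]
      obtain ⟨x, hx, hc⟩ := h2
      have hxs : x ∈ s := (hmem x).2 hx
      have hb := bnd x hxs
      rw [hcnt x, hc] at hb
      rw [if_pos (by omega : pvMC s = 2)]
    · rw [if_neg h2]
      rw [if_neg ?_]
      intro hmc2
      have hse : s ≠ [] := by
        intro hnil; rw [hnil] at hmc2; simp [pvMC] at hmc2
      obtain ⟨y, hy, hyc⟩ := att hse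
      rw [hmc2] at hyc
      exact h2 ⟨y, (hmem y).1 hy, by rw [← hcnt y]; exact_mod_cast hyc⟩

-- ===== VERDICT (by name: the statement is the Claim_ definition above) =====
theorem checkTKorPair_spec : Claim_equal_checkTKorPair := by
  intro rank _
  unfold Spec_checkTKorPair
  rw [pvA_eq_mid, pvB_eq_mid]
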